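-- pv_equiv track=rewrite | github.com/xiyan128/Pi-Sense-2048 | PiSense2048.py | isFailure
-- ===== SOURCE A (Python) =====
-- def isBoardFull(list4by4):
--   #Check if board is full of numbers
--
--   for row in list4by4:
--     for cell in row:
--       if cell == "_":
--         return(False)
--   return(True)
--
-- def isFailure(list4by4):
--   #Check if board is in a losing position
--
--   if isBoardFull(list4by4) == False: return(False)
--   #check left/right matches
--   for i in range(1,3):
--     for j in range(0,4):
--       if list4by4[j][i] == list4by4[j][i-1] or \
--       list4by4[j][i] == list4by4[j][i+1]:
--         return(False)
--   #check up/down matches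
--   for i in range(0,4):
--     for j in range(1,3):
--       if list4by4[j][i] == list4by4[j-1][i] or \
--       list4by4[j][i] == list4by4[j+1][i]:
--         return(False)
--   return(True)
-- ===== SOURCE B (Python) =====
-- def isFailure(list4by4):
--     # Streaming scan: walk the rows once, carrying only the previous row.
--     # A row with "_" (board not full), an equal horizontal pair inside the
--     # current row, or an equal vertical pair against the carried previous
--     # row means a move is still possible, so not a losing position.
--     prev = None
--     for row in list4by4:
--         if "_" in row:
--             return False
--         if prev is not None and any(p == c for p, c in zip(prev, row)):
--             return False
--         if any(a == b for a, b in zip(row, row[1:])):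
--             return False
--         prev = row
--     return True
-- ===== Notes on version B (the rewrite author's own statement) =====
-- stated objective: alternative
-- what changed: Replaced A's three staged whole-board passes (a fullness pre-scan plus two separate index-arithmetic double loops over list4by4[j][i±1] and list4by4[j±1][i]) by a single streaming pass over the rows that carries only the previous row as an accumulator, checking fullness, horizontal pairs and vertical pairs per row as it goes.
import Mathlib
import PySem

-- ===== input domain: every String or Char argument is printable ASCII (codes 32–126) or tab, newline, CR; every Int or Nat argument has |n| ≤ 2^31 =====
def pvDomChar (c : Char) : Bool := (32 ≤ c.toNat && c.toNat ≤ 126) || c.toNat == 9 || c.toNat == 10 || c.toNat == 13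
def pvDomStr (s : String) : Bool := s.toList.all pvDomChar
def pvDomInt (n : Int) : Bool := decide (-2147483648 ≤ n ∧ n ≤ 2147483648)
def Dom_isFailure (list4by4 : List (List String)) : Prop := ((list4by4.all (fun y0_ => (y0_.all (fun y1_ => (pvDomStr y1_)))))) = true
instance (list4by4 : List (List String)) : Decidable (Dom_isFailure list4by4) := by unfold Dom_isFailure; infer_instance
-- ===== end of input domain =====

-- B replaces A's three staged whole-board passes by one streaming pass over the rows carrying only the previous row (objective: alternative).

-- ===== PORT A =====
-- loop with early 'return False' over all cells ≡ short-circuiting all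
def isBoardFull (list4by4 : List (List String)) : Bool :=
  list4by4.all (fun row => row.all (fun cell => !(cell == "_")))

-- list4by4[j][i]; the .getD "" fills only the IndexError case, which Pre_ excludes
def pvCellA (list4by4 : List (List String)) (j i : Int) : String :=
  ((PySem.List.pyGet? list4by4 j).bind (fun r => PySem.List.pyGet? r i)).getD ""

def isFailure (list4by4 : List (List String)) : Bool :=
  if (isBoardFull list4by4 == false) then false
  else if (PySem.List.pyRange 1 3 1).any (fun i => (PySem.List.pyRange 0 4 1).any (fun j =>
      pvCellA list4by4 j i == pvCellA list4by4 j (i-1) ||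
      pvCellA list4by4 j i == pvCellA list4by4 j (i+1))) then false
  else if (PySem.List.pyRange 0 4 1).any (fun i => (PySem.List.pyRange 1 3 1).any (fun j =>
      pvCellA list4by4 j i == pvCellA list4by4 (j-1) i ||
      pvCellA list4by4 j i == pvCellA list4by4 (j+1) i)) then false
  else true

-- ===== PORT B =====
-- the streaming loop: prev is the carried previous row (none before the first row)
def pvScan (prev : Option (List String)) (rows : List (List String)) : Bool :=
  match rows with
  | [] => true
  | row :: rest =>
    if row.contains "_" then false
    else if (match prev with
             | some p => (p.zip row).any (fun q => q.1 == q.2)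
             | none => false) then false
    else if (row.zip row.tail).any (fun q => q.1 == q.2) then false
    else pvScan (some row) rest

def isFailure_alt (list4by4 : List (List String)) : Bool :=
  pvScan none list4by4

-- ===== PRECONDITION & SPEC =====
-- Pre_ excludes boards without '_' that are not exactly 4×4: there A indexes only the first 4×4
-- sub-board (raising IndexError when smaller, silently ignoring extra cells when larger), while B
-- sweeps the whole board.
def Pre_isFailure (list4by4 : List (List String)) : Prop :=
  "_" ∈ list4by4.flatten ∨ (list4by4.length = 4 ∧ ∀ r ∈ list4by4, r.length = 4)
instance (list4by4 : List (List String)) : Decidable (Pre_isFailure list4by4) := by unfold Pre_isFailure; infer_instance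

def pvWitness_isFailure : List (List String) :=
  [["2","4","2","4"],["4","2","4","2"],["2","4","2","4"],["4","2","4","2"]]

def Spec_isFailure (list4by4 : List (List String)) (out : Bool) : Prop := out = isFailure_alt list4by4
instance (list4by4 : List (List String)) (out : Bool) : Decidable (Spec_isFailure list4by4 out) := by unfold Spec_isFailure; infer_instance

-- ===== CLAIM (what is proved, stated in full; the proofs are below) =====
def Claim_equal_isFailure : Prop := ∀ (list4by4 : List (List String)), Dom_isFailure list4by4 → Pre_isFailure list4by4 → Spec_isFailure list4by4 (isFailure list4by4)

-- ===== LEMMAS AND PROOFS =====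

theorem nec (a b : String) : (¬ a = b) ↔ (¬ b = a) := ne_comm

theorem len_four {α : Type} (l : List α) (h : l.length = 4) : ∃ a b c d, l = [a,b,c,d] := by
  match l, h with
  | [a,b,c,d], _ => exact ⟨a,b,c,d, rfl⟩

theorem pvScan_false_of_mem (b : List (List String)) (prev : Option (List String))
    (h : "_" ∈ b.flatten) : pvScan prev b = false := by
  induction b generalizing prev with
  | nil => simp at h
  | cons row rest ih =>
    simp only [List.flatten_cons, List.mem_append] at h
    rcases h with h | h
    · simp only [pvScan]
      rw [if_pos (by simpa using h)]
    · simp only [pvScan]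
      split_ifs <;> first | rfl | exact ih (some row) h

theorem underscore_case (b : List (List String)) (h : "_" ∈ b.flatten) :
    isFailure b = isFailure_alt b := by
  obtain ⟨r, hr, hc⟩ := List.mem_flatten.mp h
  have hA : isBoardFull b = false := by
    simp only [isBoardFull, List.all_eq_false]
    refine ⟨r, hr, ?_⟩
    simp only [List.all_eq_true, not_forall]
    exact ⟨"_", ⟨hc, by simp⟩⟩
  unfold isFailure isFailure_alt
  rw [hA, pvScan_false_of_mem b none h]
  simp

set_option maxHeartbeats 1000000 in
theorem full_case' (a0 a1 a2 a3 b0 b1 b2 b3 c0 c1 c2 c3 d0 d1 d2 d3 : String)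
    (h : ¬ "_" ∈ ([[a0,a1,a2,a3],[b0,b1,b2,b3],[c0,c1,c2,c3],[d0,d1,d2,d3]] : List (List String)).flatten) :
    isFailure [[a0,a1,a2,a3],[b0,b1,b2,b3],[c0,c1,c2,c3],[d0,d1,d2,d3]] =
    isFailure_alt [[a0,a1,a2,a3],[b0,b1,b2,b3],[c0,c1,c2,c3],[d0,d1,d2,d3]] := by
  simp only [List.flatten_cons, List.flatten_nil, List.append_nil, List.mem_append,
    List.mem_cons, List.not_mem_nil, or_false, not_or] at h
  obtain ⟨⟨h1,h2,h3,h4⟩,⟨h5,h6,h7,h8⟩,⟨h9,h10,h11,h12⟩,h13,h14,h15,h16⟩ := h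
  have hfull : isBoardFull [[a0,a1,a2,a3],[b0,b1,b2,b3],[c0,c1,c2,c3],[d0,d1,d2,d3]] = true := by
    simp [isBoardFull]
    exact ⟨⟨fun e => h1 e.symm, fun e => h2 e.symm, fun e => h3 e.symm, fun e => h4 e.symm⟩,
      ⟨fun e => h5 e.symm, fun e => h6 e.symm, fun e => h7 e.symm, fun e => h8 e.symm⟩,
      ⟨fun e => h9 e.symm, fun e => h10 e.symm, fun e => h11 e.symm, fun e => h12 e.symm⟩,
      fun e => h13 e.symm, fun e => h14 e.symm, fun e => h15 e.symm, fun e => h16 e.symm⟩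
  rw [isFailure, hfull]
  have hr13 : PySem.List.pyRange 1 3 1 = [1,2] := by decide
  have hr04 : PySem.List.pyRange 0 4 1 = [0,1,2,3] := by decide
  rw [hr13, hr04]
  norm_num [isFailure_alt, pvScan, pvCellA, PySem.List.pyGet?, PySem.List.pyIdx?,
    show Int.toNat 2 = 2 from rfl, show Int.toNat 3 = 3 from rfl, show Int.toNat 1 = 1 from rfl,
    show Int.toNat 0 = 0 from rfl, List.zip, List.zipWith, List.tail,
    List.getElem?_cons_zero, List.getElem?_cons_succ,
    h1,h2,h3,h4,h5,h6,h7,h8,h9,h10,h11,h12,h13,h14,h15,h16]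
  rw [Bool.eq_iff_iff]
  simp only [Bool.and_eq_true, Bool.not_eq_true', decide_eq_false_iff_not]
  rw [nec a1 a0, nec a2 a1, nec b1 b0, nec b2 b1, nec c1 c0, nec c2 c1,
    nec d1 d0, nec d2 d1, nec b0 a0, nec c0 b0, nec b1 a1, nec c1 b1,
    nec b2 a2, nec c2 b2, nec b3 a3, nec c3 b3]
  tauto

theorem full_case (b : List (List String)) (h : ¬ "_" ∈ b.flatten)
    (h4 : b.length = 4) (hr : ∀ r ∈ b, r.length = 4) :
    isFailure b = isFailure_alt b := by
  obtain ⟨r0, r1, r2, r3, rfl⟩ := len_four b h4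
  obtain ⟨a0, a1, a2, a3, rfl⟩ := len_four r0 (hr _ (by simp))
  obtain ⟨b0, b1, b2, b3, rfl⟩ := len_four r1 (hr _ (by simp))
  obtain ⟨c0, c1, c2, c3, rfl⟩ := len_four r2 (hr _ (by simp))
  obtain ⟨d0, d1, d2, d3, rfl⟩ := len_four r3 (hr _ (by simp))
  exact full_case' a0 a1 a2 a3 b0 b1 b2 b3 c0 c1 c2 c3 d0 d1 d2 d3 h

-- ===== VERDICT (by name: the statement is the Claim_ definition above) =====
theorem isFailure_spec : Claim_equal_isFailure := by
  intro b _ hpre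
  unfold Spec_isFailure
  rcases hpre with h | ⟨h4, hr⟩
  · exact underscore_case b h
  · by_cases hu : "_" ∈ b.flatten
    · exact underscore_case b hu
    · exact full_case b hu h4 hr
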